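-- pv_equiv track=rewrite | github.com/RasmusKoit/wordleSolverEE | wordle.py | foundWordsRemover
-- ===== SOURCE A (Python) =====
-- def foundWordsRemover(words, user_guess):
--     new_set = set()
--     for letter in user_guess["found"]:
--         for word in words:
--             if letter in word:
--                 new_set.add(word)
--     for letter in user_guess["found"]:
--         for word in new_set.copy():
--             if letter not in word:
--                 new_set.remove(word)
--     return new_set
-- ===== SOURCE B (Python) =====
-- def foundWordsRemover(words, user_guess):
--     found = user_guess["found"]
--     if not found:
--         return set()
--     return {w for w in words if all(l in w for l in found)}
-- ===== Notes on version B (the rewrite author's own statement) =====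
-- stated objective: simpler
-- what changed: Replaces the build-then-prune double pass over letters (add any word containing some found letter, then delete words missing one) by a single comprehension over words keeping exactly the words that contain every found letter (empty result when no letters were found).
import Mathlib
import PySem

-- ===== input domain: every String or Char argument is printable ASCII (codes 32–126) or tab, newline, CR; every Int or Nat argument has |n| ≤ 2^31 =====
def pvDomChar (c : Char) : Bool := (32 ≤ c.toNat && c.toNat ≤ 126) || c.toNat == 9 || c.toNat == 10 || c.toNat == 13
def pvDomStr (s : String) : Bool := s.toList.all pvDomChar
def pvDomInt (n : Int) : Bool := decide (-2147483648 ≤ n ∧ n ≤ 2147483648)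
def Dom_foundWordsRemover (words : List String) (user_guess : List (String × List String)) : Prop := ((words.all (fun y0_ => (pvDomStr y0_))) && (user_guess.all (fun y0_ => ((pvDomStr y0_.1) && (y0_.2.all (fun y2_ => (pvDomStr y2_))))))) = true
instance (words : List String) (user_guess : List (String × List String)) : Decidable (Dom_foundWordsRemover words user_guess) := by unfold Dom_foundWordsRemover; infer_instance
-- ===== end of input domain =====

-- B replaces A's build-then-prune double pass by one comprehension keeping the words
-- that contain every found letter (objective: simpler).

-- ===== PORT A =====
-- A: build a set of every word containing some found letter, then prune words missing a letter.
def foundWordsRemover (words : List String) (user_guess : List (String × List String)) : List String :=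
  match PySem.Dict.get? (PySem.Dict.mk user_guess) "found" with
  | none => []  -- KeyError: excluded by Pre_foundWordsRemover
  | some (found : List String) =>
    let s1 : PySem.Set String :=
      found.foldl (fun s letter =>
        words.foldl (fun s word =>
          if PySem.Str.isIn letter word then PySem.Set.add s word else s) s)
        PySem.Set.empty
    found.foldl (fun s letter =>
      -- 'for word in new_set.copy()': iterate the snapshot s, remove from the accumulator;
      -- the removed word is always present (the snapshot is duplicate-free), so remove? never raises
      s.foldl (fun s' word =>
        if !(PySem.Str.isIn letter word) then (PySem.Set.remove? s' word).getD s' else s') s)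
      s1

-- ===== PORT B =====
def foundWordsRemover_alt (words : List String) (user_guess : List (String × List String)) : List String :=
  match PySem.Dict.get? (PySem.Dict.mk user_guess) "found" with
  | none => []  -- KeyError: excluded by Pre_foundWordsRemover
  | some (found : List String) =>
    if found.isEmpty then PySem.Set.empty
    else PySem.Set.ofList (words.filter (fun w => found.all (fun l => PySem.Str.isIn l w)))

-- ===== PRECONDITION & SPEC =====
-- Pre_: the dict must carry the "found" key; otherwise Python raises KeyError.
def Pre_foundWordsRemover (words : List String) (user_guess : List (String × List String)) : Prop :=
  PySem.Dict.contains (PySem.Dict.mk user_guess) "found" = true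
instance (words : List String) (user_guess : List (String × List String)) : Decidable (Pre_foundWordsRemover words user_guess) := by unfold Pre_foundWordsRemover; infer_instance
def pvWitness_foundWordsRemover : List String × (List (String × List String)) :=
  (["ab", "b", "a"], [("found", ["a"])])

def Spec_foundWordsRemover (words : List String) (user_guess : List (String × List String)) (out : List String) : Prop := out = foundWordsRemover_alt words user_guess
instance (words : List String) (user_guess : List (String × List String)) (out : List String) : Decidable (Spec_foundWordsRemover words user_guess out) := by unfold Spec_foundWordsRemover; infer_instance

-- ===== CLAIM (what is proved, stated in full; the proofs are below) =====
def Claim_equal_foundWordsRemover : Prop := ∀ (words : List String) (user_guess : List (String × List String)), Dom_foundWordsRemover words user_guess → Pre_foundWordsRemover words user_guess → Spec_foundWordsRemover words user_guess (foundWordsRemover words user_guess)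

-- ===== LEMMAS AND PROOFS =====

theorem pv_phase1_inner (words : List String) (c : String → Bool) (s : List String) :
    words.foldl (fun s word => if c word then PySem.Set.add s word else s) s
      = PySem.Set.update s (words.filter c) := by
  rw [PySem.List.foldl_if_eq_foldl_filter]; rfl

theorem pv_phase1 (g : String → List String) (found : List String) (L : List String) :
    found.foldl (fun s letter => PySem.Set.update s (g letter)) (PySem.Set.ofList L)
      = PySem.Set.ofList (L ++ found.flatMap g) := by
  induction found generalizing L with
  | nil => simp
  | cons f0 rest ih =>
    simp only [List.foldl_cons, ← PySem.Set.ofList_append, ih, List.flatMap_cons, List.append_assoc]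

theorem pv_getD_remove? (a : List String) (w : String) :
    (PySem.Set.remove? a w).getD a = a.filter (fun y => !(y == w)) := by
  by_cases hw : w ∈ a
  · rw [PySem.Set.remove?_of_mem hw]; rfl
  · rw [(PySem.Set.remove?_eq_none_iff _ _).mpr hw, Option.getD_none]
    refine (List.filter_eq_self.mpr ?_).symm
    intro x hx
    exact bne_iff_ne.mpr (fun h => hw (h ▸ hx))

theorem pv_remove_fold (q : String → Bool) (l : List String) (a : List String) :
    l.foldl (fun s' w => if !(q w) then (PySem.Set.remove? s' w).getD s' else s') a
      = a.filter (fun x => q x || decide (x ∉ l)) := by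
  induction l generalizing a with
  | nil => simp
  | cons w l ih =>
    simp only [List.foldl_cons]
    by_cases hq : q w = true
    · rw [show (if (!q w) = true then (PySem.Set.remove? a w).getD a else a) = a by simp [hq]]
      rw [ih a]
      refine List.filter_congr ?_
      intro x hx
      by_cases hxw : x = w
      · subst hxw; simp [hq]
      · simp [List.mem_cons, hxw]
    · replace hq : q w = false := by simpa using hq
      rw [show (if (!q w) = true then (PySem.Set.remove? a w).getD a else a)
            = (PySem.Set.remove? a w).getD a by simp [hq]]
      rw [pv_getD_remove?, ih, List.filter_filter]
      refine List.filter_congr ?_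
      intro x hx
      by_cases hxw : x = w
      · subst hxw; simp [hq]
      · simp [List.mem_cons, hxw]

theorem pv_phase2_inner (q : String → Bool) (a : List String) :
    a.foldl (fun s' w => if !(q w) then (PySem.Set.remove? s' w).getD s' else s') a
      = a.filter q := by
  rw [pv_remove_fold q a a]
  refine List.filter_congr ?_
  intro x hx; simp [hx]

theorem pv_phase2 (found : List String) (a : List String) :
    found.foldl (fun s letter =>
      s.foldl (fun s' word =>
        if !(PySem.Str.isIn letter word) then (PySem.Set.remove? s' word).getD s' else s') s) a
      = a.filter (fun w => found.all (fun l => PySem.Str.isIn l w)) := by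
  induction found generalizing a with
  | nil => simp
  | cons f0 rest ih =>
    simp only [List.foldl_cons]
    rw [pv_phase2_inner, ih, List.filter_filter]
    refine List.filter_congr ?_
    intro x hx
    simp [List.all_cons, Bool.and_comm]

theorem pv_ofList_filter (p : String → Bool) (xs : List String) :
    (PySem.Set.ofList xs).filter p = PySem.Set.ofList (xs.filter p) := by
  induction xs using List.reverseRecOn with
  | nil => rfl
  | append_singleton xs x ih =>
    rw [PySem.Set.ofList_append_singleton, PySem.Set.add_eq_ite, List.filter_append]
    by_cases hp : p x = true
    · by_cases hx : x ∈ PySem.Set.ofList xs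
      · rw [if_pos hx, ih]
        have hx' : x ∈ PySem.Set.ofList (xs.filter p) := by
          rw [PySem.Set.mem_ofList] at hx ⊢
          exact List.mem_filter.mpr ⟨hx, hp⟩
        simp [hp, PySem.Set.ofList_append_singleton, PySem.Set.add_of_mem hx']
      · rw [if_neg hx, List.filter_append, ih]
        have hx' : x ∉ PySem.Set.ofList (xs.filter p) := by
          rw [PySem.Set.mem_ofList] at hx ⊢
          exact fun h => hx (List.mem_filter.mp h).1
        simp [hp, PySem.Set.ofList_append_singleton, PySem.Set.add_of_not_mem hx']
    · have hp' : p x = false := by simpa using hp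
      by_cases hx : x ∈ PySem.Set.ofList xs
      · rw [if_pos hx, ih]; simp [hp']
      · rw [if_neg hx, List.filter_append, ih]; simp [hp']

theorem pv_filter_flatMap (g : String → List String) (p : String → Bool) (l : List String) :
    (l.flatMap g).filter p = l.flatMap (fun x => (g x).filter p) := by
  induction l with
  | nil => rfl
  | cons x l ih => simp [List.flatMap_cons, List.filter_append, ih]

theorem pv_flatMap_congr (l : List String) (g h : String → List String)
    (H : ∀ x ∈ l, g x = h x) : l.flatMap g = l.flatMap h := by
  induction l with
  | nil => rfl
  | cons x l ih =>
    simp only [List.flatMap_cons, H x (List.mem_cons_self), ih (fun y hy => H y (List.mem_cons_of_mem _ hy))]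

theorem pv_ofList_append_subset (W T : List String) (h : ∀ y ∈ T, y ∈ W) :
    PySem.Set.ofList (W ++ T) = PySem.Set.ofList W := by
  rw [PySem.Set.ofList_append, PySem.Set.update_eq_append_filter]
  have : (PySem.Set.ofList T).filter (fun y => !(PySem.Set.contains (PySem.Set.ofList W) y)) = [] := by
    rw [List.filter_eq_nil_iff]
    intro y hy
    have hyW : y ∈ W := by
      rw [PySem.Set.mem_ofList] at hy
      exact h y hy
    simpa using hyW
  rw [this, List.append_nil]

theorem pv_block (words : List String) (found : List String) (l : String) (hl : l ∈ found) :
    (words.filter (fun w => PySem.Str.isIn l w)).filter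
        (fun w => found.all (fun x => PySem.Str.isIn x w))
      = words.filter (fun w => found.all (fun x => PySem.Str.isIn x w)) := by
  rw [List.filter_filter]
  refine List.filter_congr ?_
  intro w _
  simp only [Bool.and_eq_left_iff_imp, List.all_eq_true, PySem.Str.isIn_eq]
  exact fun h => h l hl

theorem main_eq (words : List String) (user_guess : List (String × List String)) :
    foundWordsRemover words user_guess = foundWordsRemover_alt words user_guess := by
  unfold foundWordsRemover foundWordsRemover_alt
  cases hget : PySem.Dict.get? (PySem.Dict.mk user_guess) "found" with
  | none => rfl
  | some found =>
    cases found with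
    | nil => rfl
    | cons f0 rest =>
      simp only [List.isEmpty_cons, Bool.false_eq_true, if_false]
      set g : String → List String := fun l => words.filter (fun w => PySem.Str.isIn l w) with hg
      set p : String → Bool := fun w => (f0 :: rest).all (fun l => PySem.Str.isIn l w) with hp
      have h1 : (f0 :: rest).foldl (fun s letter =>
          words.foldl (fun s word =>
            if PySem.Str.isIn letter word then PySem.Set.add s word else s) s)
          PySem.Set.empty
          = PySem.Set.ofList ((f0 :: rest).flatMap g) := by
        simp only [pv_phase1_inner]
        have h := pv_phase1 g (f0 :: rest) []
        simpa using h
      rw [h1, pv_phase2, pv_ofList_filter, pv_filter_flatMap]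
      rw [pv_flatMap_congr (f0 :: rest) _ (fun _ => words.filter p)
            (fun x hx => pv_block words (f0 :: rest) x hx)]
      rw [List.flatMap_cons]
      exact pv_ofList_append_subset _ _ (by
        intro y hy
        rcases List.mem_flatMap.mp hy with ⟨x, _, hyx⟩
        exact hyx)

-- ===== VERDICT (by name: the statement is the Claim_ definition above) =====
theorem foundWordsRemover_spec : Claim_equal_foundWordsRemover := by
  intro words user_guess _ _
  exact main_eq words user_guess
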